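-- pv_equiv track=rewrite | github.com/purvansh23/mini-cloud-resource-manager | mini-cloud/controller/app/tools/sync_vms_from_xen.py | parse_xe_vm_list
-- ===== SOURCE A (Python) =====
-- def _normalize_key(raw_key: str) -> str:
--     """
--     Normalize keys like:
--       "uuid ( RO)" -> "uuid"
--       "name-label ( RW)" -> "name_label"
--       "power-state ( RO)" -> "power_state"
--     """
--     k = raw_key.strip()
--     # drop any parenthetical flags like " ( RO)" or " (MRW)"
--     if "(" in k:
--         k = k.split("(")[0].strip()
--     # normalize separators to underscore and lowercase
--     k = k.replace("-", "_").replace(" ", "_").lower()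
--     return k
--
-- def parse_xe_vm_list(raw):
--     """
--     Parse output of:
--       xe vm-list params=uuid,name-label,resident-on,power-state
--     into list of dicts with normalized keys.
--     """
--     items = []
--     current = {}
--     for line in raw.splitlines():
--         line = line.strip()
--         if not line:
--             if current:
--                 items.append(current)
--                 current = {}
--             continue
--         # xe lines contain "key : value"
--         if ":" not in line:
--             continue
--         left, right = line.split(":", 1)
--         key = _normalize_key(left)
--         value = right.strip()
--         current[key] = value if value != "" else None
--     if current:
--         items.append(current)
--     return items
-- ===== SOURCE B (Python) =====
-- def _normalize_key(raw_key: str) -> str: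
--     k = raw_key.strip()
--     if "(" in k:
--         k = k.split("(")[0].strip()
--     k = k.replace("-", "_").replace(" ", "_").lower()
--     return k
--
-- def _blocks(lines):
--     """Partition stripped lines into blocks separated by blank lines."""
--     blocks, block = [], []
--     for line in lines:
--         s = line.strip()
--         if s:
--             block.append(s)
--         else:
--             blocks.append(block)
--             block = []
--     blocks.append(block)
--     return blocks
--
-- def parse_xe_vm_list(raw):
--     items = []
--     for block in _blocks(raw.splitlines()):
--         d = {}
--         for line in block:
--             if ":" in line:
--                 left, _, right = line.partition(":")
--                 value = right.strip()
--                 d[_normalize_key(left)] = value if value else None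
--         if d:
--             items.append(d)
--     return items
-- ===== Notes on version B (the rewrite author's own statement) =====
-- stated objective: alternative
-- what changed: Replaces A's single loop with interleaved flush logic (mutable current dict, conditional mid-loop appends plus a final-flush special case) by two uniform phases: partition the stripped lines into blank-separated blocks, then build one dict per block and keep the non-empty ones.
import Mathlib
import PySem

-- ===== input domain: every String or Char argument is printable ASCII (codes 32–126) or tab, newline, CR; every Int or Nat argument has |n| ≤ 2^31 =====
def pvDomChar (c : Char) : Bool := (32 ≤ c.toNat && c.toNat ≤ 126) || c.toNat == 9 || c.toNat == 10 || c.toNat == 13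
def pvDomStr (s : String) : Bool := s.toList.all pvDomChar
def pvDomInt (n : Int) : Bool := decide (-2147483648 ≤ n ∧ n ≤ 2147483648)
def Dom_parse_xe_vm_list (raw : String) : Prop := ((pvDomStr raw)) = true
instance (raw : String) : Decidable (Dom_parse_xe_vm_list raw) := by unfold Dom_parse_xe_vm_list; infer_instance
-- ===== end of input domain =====

-- B re-decomposes A's single loop with interleaved flush logic into two uniform phases
-- (partition the lines into blank-separated blocks, then build one dict per block);
-- same return value on every input, no speed claim.

-- ===== PORT A =====
-- shared helper: _normalize_key (defined identically in Source A and Source B)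
def pvNormKey (rawKey : List Char) : List Char :=
  let k := PySem.Chars.strip rawKey
  let k := if PySem.Chars.isIn ['('] k
           then PySem.Chars.strip ((PySem.Chars.splitOn k ['(']).getD 0 [])
           else k
  PySem.Chars.lower (PySem.Chars.replace (PySem.Chars.replace k ['-'] ['_']) [' '] ['_'])

-- one iteration of A's loop; state = (items, current)
def pvStepA (st : List (PySem.Dict String (Option String)) × PySem.Dict String (Option String))
    (line0 : List Char) :
    List (PySem.Dict String (Option String)) × PySem.Dict String (Option String) :=
  let items := st.1
  let current := st.2
  let line := PySem.Chars.strip line0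
  if line = [] then
    (if current.items ≠ [] then (items ++ [current], PySem.Dict.empty) else (items, current))
  else if PySem.Chars.isIn [':'] line = false then (items, current)
  else
    -- left, right = line.split(":", 1)  (guarded: ":" in line, so there are two pieces)
    let parts := PySem.Chars.splitOnMax line [':'] 1
    let left := parts.getD 0 []
    let right := parts.getD 1 []
    let key := pvNormKey left
    let value := PySem.Chars.strip right
    (items, current.insert (String.ofList key)
      (if value ≠ [] then some (String.ofList value) else none))

def parse_xe_vm_list (raw : String) : List (List (String × Option String)) :=
  let st := ((PySem.Str.splitlines raw).map String.toList).foldl pvStepA ([], PySem.Dict.empty)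
  let items := if st.2.items ≠ [] then st.1 ++ [st.2] else st.1
  items.map PySem.Dict.items

-- ===== PORT B =====
-- one iteration of _blocks' loop; state = (blocks, block)
def pvBStep (st : List (List (List Char)) × List (List Char)) (line : List Char) :
    List (List (List Char)) × List (List Char) :=
  let s := PySem.Chars.strip line
  if s ≠ [] then (st.1, st.2 ++ [s]) else (st.1 ++ [st.2], [])

-- _blocks: partition the stripped lines into blank-separated blocks
def pvBlocks (lines : List (List Char)) : List (List (List Char)) :=
  let st := lines.foldl pvBStep ([], [])
  st.1 ++ [st.2]

-- one line of B's inner dict-building loop (lines of a block are already stripped)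
def pvDStep (d : PySem.Dict String (Option String)) (line : List Char) :
    PySem.Dict String (Option String) :=
  if PySem.Chars.isIn [':'] line then
    -- hand port of line.partition(":") (exact: splits at the FIRST ':'; guarded by ":" in line)
    let left := line.takeWhile (fun c => c != ':')
    let right := (line.dropWhile (fun c => c != ':')).drop 1
    let value := PySem.Chars.strip right
    d.insert (String.ofList (pvNormKey left)) (if value ≠ [] then some (String.ofList value) else none)
  else d

def pvBlockDict (block : List (List Char)) : PySem.Dict String (Option String) :=
  block.foldl pvDStep PySem.Dict.empty

-- one iteration of B's outer loop: append the block's dict if it is non-empty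
def pvItemStep (items : List (List (String × Option String))) (block : List (List Char)) :
    List (List (String × Option String)) :=
  let d := pvBlockDict block
  if d.items ≠ [] then items ++ [d.items] else items

def parse_xe_vm_list_alt (raw : String) : List (List (String × Option String)) :=
  (pvBlocks ((PySem.Str.splitlines raw).map String.toList)).foldl pvItemStep []

-- ===== PRECONDITION & SPEC =====
def Spec_parse_xe_vm_list (raw : String) (out : List (List (String × Option String))) : Prop := out = parse_xe_vm_list_alt raw
instance (raw : String) (out : List (List (String × Option String))) : Decidable (Spec_parse_xe_vm_list raw out) := by unfold Spec_parse_xe_vm_list; infer_instance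

-- ===== CLAIM (what is proved, stated in full; the proofs are below) =====
def Claim_equal_parse_xe_vm_list : Prop := ∀ (raw : String), Dom_parse_xe_vm_list raw → Spec_parse_xe_vm_list raw (parse_xe_vm_list raw)

-- ===== LEMMAS AND PROOFS =====

-- common recursive specification: process the remaining lines with an open dict `cur`
def pvProc : List (List Char) → PySem.Dict String (Option String) →
    List (List (String × Option String))
  | [], cur => if cur.items ≠ [] then [cur.items] else []
  | l :: ls, cur =>
    if PySem.Chars.strip l = [] then
      (if cur.items ≠ [] then cur.items :: pvProc ls PySem.Dict.empty else pvProc ls PySem.Dict.empty)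
    else pvProc ls (pvDStep cur (PySem.Chars.strip l))

-- A's final flush, applied to the loop state
def pvFinA (st : List (PySem.Dict String (Option String)) × PySem.Dict String (Option String)) :
    List (List (String × Option String)) :=
  (if st.2.items ≠ [] then st.1 ++ [st.2] else st.1).map PySem.Dict.items

-- splitOnMax.go with maxsplit exhausted returns the rest as one piece
theorem pvGo0 (fuel : Nat) (l cur : List Char) (acc : List (List Char)) :
    PySem.Chars.splitOnMax.go [':'] fuel 0 l cur acc = acc.reverse ++ [cur.reverse ++ l] := by
  cases fuel with
  | zero => simp [PySem.Chars.splitOnMax.go]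
  | succ f =>
    cases l with
    | nil => simp [PySem.Chars.splitOnMax.go]
    | cons c r => simp [PySem.Chars.splitOnMax.go]

-- splitOnMax.go with maxsplit 1 splits at the first ':' (takeWhile / dropWhile form)
theorem pvGo1 (l : List Char) (fuel : Nat) (cur : List Char) (acc : List (List Char))
    (hf : l.length < fuel) :
    PySem.Chars.splitOnMax.go [':'] fuel 1 l cur acc =
      if ':' ∈ l then
        acc.reverse ++ [cur.reverse ++ l.takeWhile (fun c => c != ':'),
          (l.dropWhile (fun c => c != ':')).drop 1]
      else acc.reverse ++ [cur.reverse ++ l] := by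
  induction l generalizing fuel cur acc with
  | nil =>
    cases fuel with
    | zero => omega
    | succ f => simp [PySem.Chars.splitOnMax.go]
  | cons c r ih =>
    cases fuel with
    | zero => simp at hf
    | succ f =>
      by_cases hc : c = ':'
      · subst hc
        simp [PySem.Chars.splitOnMax.go, List.isPrefixOf, pvGo0]
      · have hr : r.length < f := by simpa using hf
        have hpre : ([':'] : List Char).isPrefixOf (c :: r) = false := by
          simp [List.isPrefixOf, Ne.symm hc]
        rw [show PySem.Chars.splitOnMax.go [':'] (f + 1) 1 (c :: r) cur acc =
              PySem.Chars.splitOnMax.go [':'] f 1 r (c :: cur) acc by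
              simp [PySem.Chars.splitOnMax.go, hpre]]
        rw [ih f (c :: cur) acc hr]
        by_cases hm : ':' ∈ r <;> simp [hm, hc, Ne.symm hc]

theorem pvIsIn_colon (l : List Char) : PySem.Chars.isIn [':'] l = true ↔ ':' ∈ l := by
  rw [PySem.Chars.isIn_iff_infix]
  constructor
  · intro h; exact List.singleton_sublist.mp h.sublist
  · intro h
    obtain ⟨s, t, rfl⟩ := List.append_of_mem h
    exact ⟨s, t, by simp⟩

-- A's step equals B's dict step on a non-blank line
theorem pvStepA_eq_pvDStep (items : List (PySem.Dict String (Option String)))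
    (cur : PySem.Dict String (Option String)) (l : List Char)
    (hne : PySem.Chars.strip l ≠ []) :
    pvStepA (items, cur) l = (items, pvDStep cur (PySem.Chars.strip l)) := by
  unfold pvStepA pvDStep
  by_cases hin : PySem.Chars.isIn [':'] (PySem.Chars.strip l) = true
  · have hmem : ':' ∈ PySem.Chars.strip l := (pvIsIn_colon _).mp hin
    have hsplit : PySem.Chars.splitOnMax (PySem.Chars.strip l) [':'] 1 =
        [(PySem.Chars.strip l).takeWhile (fun c => c != ':'),
         ((PySem.Chars.strip l).dropWhile (fun c => c != ':')).drop 1] := by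
      unfold PySem.Chars.splitOnMax
      rw [if_neg (by norm_num)]
      rw [show ((1 : Int).toNat) = 1 from rfl]
      rw [pvGo1 _ _ _ _ (by omega)]
      simp [hmem]
    simp [hne, hin, hsplit]
  · have hin' : PySem.Chars.isIn [':'] (PySem.Chars.strip l) = false :=
      eq_false_of_ne_true hin
    simp [hne, hin']

-- A's loop (with its final flush) computes pvProc
theorem pvA_loop (lines : List (List Char)) (items : List (PySem.Dict String (Option String)))
    (cur : PySem.Dict String (Option String)) :
    pvFinA (lines.foldl pvStepA (items, cur)) = items.map PySem.Dict.items ++ pvProc lines cur := by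
  induction lines generalizing items cur with
  | nil =>
    simp only [List.foldl_nil, pvFinA, pvProc]
    by_cases h : cur.items = [] <;> simp [h]
  | cons l ls ih =>
    rw [List.foldl_cons]
    by_cases hb : PySem.Chars.strip l = []
    · by_cases hc : cur.items = []
      · have hcur : cur = PySem.Dict.empty := by
          apply PySem.Dict.ext; simpa using hc
        have hst : pvStepA (items, cur) l = (items, cur) := by
          unfold pvStepA; simp [hb, hc]
        rw [hst, ih]
        simp [pvProc, hb, hcur,
          show (PySem.Dict.empty : PySem.Dict String (Option String)).items = [] from rfl]
      · have hst : pvStepA (items, cur) l = (items ++ [cur], PySem.Dict.empty) := by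
          unfold pvStepA; simp [hb, hc]
        rw [hst, ih]
        simp [pvProc, hb, hc]
    · rw [pvStepA_eq_pvDStep _ _ _ hb, ih]
      simp [pvProc, hb]

-- B's _blocks loop computes pvGRec, the recursive form of the block partition
def pvGRec : List (List Char) → List (List Char) → List (List (List Char))
  | [], b => [b]
  | l :: ls, b =>
    if PySem.Chars.strip l = [] then b :: pvGRec ls []
    else pvGRec ls (b ++ [PySem.Chars.strip l])

theorem pvBlocks_fold (lines : List (List Char)) (bs : List (List (List Char)))
    (b : List (List Char)) :
    (lines.foldl pvBStep (bs, b)).1 ++ [(lines.foldl pvBStep (bs, b)).2] =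
      bs ++ pvGRec lines b := by
  induction lines generalizing bs b with
  | nil => simp [pvGRec]
  | cons l ls ih =>
    rw [List.foldl_cons]
    by_cases hb : PySem.Chars.strip l = []
    · have hst : pvBStep (bs, b) l = (bs ++ [b], []) := by unfold pvBStep; simp [hb]
      rw [hst, ih]
      simp [pvGRec, hb]
    · have hst : pvBStep (bs, b) l = (bs, b ++ [PySem.Chars.strip l]) := by
        unfold pvBStep; simp [hb]
      rw [hst, ih]
      simp [pvGRec, hb]

def pvItemsOf : List (List (List Char)) → List (List (String × Option String))
  | [] => []
  | blk :: bs =>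
    (if (pvBlockDict blk).items ≠ [] then [(pvBlockDict blk).items] else []) ++ pvItemsOf bs

theorem pvItems_fold (blocks : List (List (List Char)))
    (items : List (List (String × Option String))) :
    blocks.foldl pvItemStep items = items ++ pvItemsOf blocks := by
  induction blocks generalizing items with
  | nil => simp [pvItemsOf]
  | cons blk bs ih =>
    rw [List.foldl_cons, ih]
    by_cases h : (pvBlockDict blk).items = [] <;> simp [pvItemStep, pvItemsOf, h]

-- B's per-block dicts are pvProc of the lines
theorem pvB_main (lines : List (List Char)) (b : List (List Char)) :
    pvItemsOf (pvGRec lines b) = pvProc lines (pvBlockDict b) := by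
  induction lines generalizing b with
  | nil =>
    by_cases h : (pvBlockDict b).items = [] <;> simp [pvGRec, pvItemsOf, pvProc, h]
  | cons l ls ih =>
    by_cases hb : PySem.Chars.strip l = []
    · rw [show pvGRec (l :: ls) b = b :: pvGRec ls [] by simp [pvGRec, hb]]
      rw [pvItemsOf, ih []]
      rw [show pvBlockDict [] = PySem.Dict.empty from rfl]
      by_cases hc : (pvBlockDict b).items = [] <;> simp [pvProc, hb, hc]
    · rw [show pvGRec (l :: ls) b = pvGRec ls (b ++ [PySem.Chars.strip l]) by
          simp [pvGRec, hb]]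
      rw [ih]
      rw [show pvBlockDict (b ++ [PySem.Chars.strip l]) =
            pvDStep (pvBlockDict b) (PySem.Chars.strip l) by
          unfold pvBlockDict; rw [List.foldl_append]; rfl]
      simp [pvProc, hb]

-- ===== VERDICT (by name: the statement is the Claim_ definition above) =====
theorem parse_xe_vm_list_spec : Claim_equal_parse_xe_vm_list := by
  intro raw _
  unfold Spec_parse_xe_vm_list parse_xe_vm_list parse_xe_vm_list_alt pvBlocks
  rw [pvItems_fold, pvBlocks_fold]
  simp only [List.nil_append]
  rw [pvB_main]
  have h := pvA_loop ((PySem.Str.splitlines raw).map String.toList) [] PySem.Dict.empty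
  simpa [pvFinA] using h
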